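-- pv_equiv track=rewrite | github.com/edaleeta/advent-of-code-2021 | day-16/day-16.py | apply_operator
-- ===== SOURCE A (Python) =====
-- def apply_operator(type_id, values):
--     if type_id == 0:
--         return sum(values)
--     if type_id == 1:
--         prod = 1
--         for value in values:
--             prod *= value
--         return prod
--     if type_id == 2:
--         return min(values)
--     if type_id == 3:
--         return max(values)
--     if type_id == 5:
--         if len(values) != 2:
--             raise Exception(f"Invalid number of values, received {values}")
--         return 1 if values[0] > values[1] else 0
--     if type_id == 6:
--         if len(values) != 2:
--             raise Exception(f"Invalid number of values, received {values}")
--         return 1 if values[0] < values[1] else 0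
--     if type_id == 7:
--         if len(values) != 2:
--             raise Exception(f"Invalid number of values, received {values}")
--         return 1 if values[0] == values[1] else 0
--
--     raise Exception(f'Invalid type_id {type_id} given.')
-- ===== SOURCE B (Python) =====
-- # B: one pass computing all four statistics (sum, prod, min, max) at once, then
-- # selecting by type_id; the three comparisons collapse to one sign-of-difference
-- # computation matched against a target sign (objective: alternative decomposition).
-- def apply_operator(type_id, values):
--     if 0 <= type_id <= 3:
--         s, p, mn, mx = 0, 1, None, None
--         for v in values:
--             s += v
--             p *= v
--             mn = v if mn is None or v < mn else mn
--             mx = v if mx is None or v > mx else mx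
--         result = (s, p, mn, mx)[type_id]
--         if result is None:
--             raise ValueError("min()/max() of empty sequence")
--         return result
--     if 5 <= type_id <= 7:
--         if len(values) != 2:
--             raise Exception(f"Invalid number of values, received {values}")
--         d = values[0] - values[1]
--         sign = (d > 0) - (d < 0)
--         return int(sign == (1, -1, 0)[type_id - 5])
--     raise Exception(f'Invalid type_id {type_id} given.')
-- ===== Notes on version B (the rewrite author's own statement) =====
-- stated objective: alternative
-- what changed: B makes a single pass computing sum, product, min and max simultaneously and selects one by type_id, and replaces the three separate comparison branches by one sign-of-difference computation matched against a per-type target sign.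
import Mathlib
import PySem

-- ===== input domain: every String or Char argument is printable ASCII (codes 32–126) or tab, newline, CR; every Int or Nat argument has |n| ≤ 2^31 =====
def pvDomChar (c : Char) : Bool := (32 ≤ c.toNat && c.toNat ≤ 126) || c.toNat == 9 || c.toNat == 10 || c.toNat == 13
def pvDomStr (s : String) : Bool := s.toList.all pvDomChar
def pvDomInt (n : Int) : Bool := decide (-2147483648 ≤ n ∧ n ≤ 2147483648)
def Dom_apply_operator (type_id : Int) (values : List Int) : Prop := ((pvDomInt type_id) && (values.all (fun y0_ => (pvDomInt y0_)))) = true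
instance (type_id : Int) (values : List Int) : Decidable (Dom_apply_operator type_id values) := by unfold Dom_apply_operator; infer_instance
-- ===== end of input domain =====

-- B computes sum/prod/min/max in one combined pass and selects by type_id, and replaces the
-- three comparison branches by one sign-of-difference test (objective: alternative decomposition).
-- ===== PORT A =====
def apply_operator (type_id : Int) (values : List Int) : Int :=
  if type_id == 0 then values.foldl (· + ·) 0
  else if type_id == 1 then values.foldl (fun prod value => prod * value) 1
  else if type_id == 2 then (PySem.List.min? values (fun x => x)).getD 0   -- empty list raises ValueError: excluded by Pre_
  else if type_id == 3 then (PySem.List.max? values (fun x => x)).getD 0   -- empty list raises ValueError: excluded by Pre_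
  else if type_id == 5 then
    if values.length ≠ 2 then 0  -- raise: excluded by Pre_
    else if (PySem.List.pyGet? values 0).getD 0 > (PySem.List.pyGet? values 1).getD 0 then 1 else 0
  else if type_id == 6 then
    if values.length ≠ 2 then 0  -- raise: excluded by Pre_
    else if (PySem.List.pyGet? values 0).getD 0 < (PySem.List.pyGet? values 1).getD 0 then 1 else 0
  else if type_id == 7 then
    if values.length ≠ 2 then 0  -- raise: excluded by Pre_
    else if (PySem.List.pyGet? values 0).getD 0 == (PySem.List.pyGet? values 1).getD 0 then 1 else 0
  else 0  -- raise Exception('Invalid type_id …'): excluded by Pre_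

-- ===== PORT B =====
-- the combined one-pass accumulator of Source B: (s, p, mn, mx)
def pvStep (acc : Int × Int × Option Int × Option Int) (v : Int) : Int × Int × Option Int × Option Int :=
  (acc.1 + v, acc.2.1 * v,
   some (match acc.2.2.1 with | none => v | some m => if v < m then v else m),
   some (match acc.2.2.2 with | none => v | some m => if v > m then v else m))

def apply_operator_alt (type_id : Int) (values : List Int) : Int :=
  if 0 ≤ type_id ∧ type_id ≤ 3 then
    let st := values.foldl pvStep (0, 1, none, none)
    if type_id = 0 then st.1
    else if type_id = 1 then st.2.1
    else if type_id = 2 then st.2.2.1.getD 0   -- None → raise ValueError: excluded by Pre_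
    else st.2.2.2.getD 0                       -- None → raise ValueError: excluded by Pre_
  else if 5 ≤ type_id ∧ type_id ≤ 7 then
    if values.length ≠ 2 then 0  -- raise: excluded by Pre_
    else
      let d := (PySem.List.pyGet? values 0).getD 0 - (PySem.List.pyGet? values 1).getD 0
      let sign : Int := (if d > 0 then 1 else 0) - (if d < 0 then 1 else 0)
      let target : Int := if type_id = 5 then 1 else if type_id = 6 then -1 else 0
      if sign = target then 1 else 0
  else 0  -- raise: excluded by Pre_

-- ===== PRECONDITION & SPEC =====
-- Pre_ excludes exactly the inputs where A raises: unknown type_id, min/max of an empty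
-- list, and a comparison type_id with arity ≠ 2.
def Pre_apply_operator (type_id : Int) (values : List Int) : Prop :=
  (type_id = 0 ∨ type_id = 1) ∨
  ((type_id = 2 ∨ type_id = 3) ∧ values ≠ []) ∨
  ((type_id = 5 ∨ type_id = 6 ∨ type_id = 7) ∧ values.length = 2)
instance (type_id : Int) (values : List Int) : Decidable (Pre_apply_operator type_id values) := by unfold Pre_apply_operator; infer_instance
def pvWitness_apply_operator : Int × List Int := (5, [3, 1])
def Spec_apply_operator (type_id : Int) (values : List Int) (out : Int) : Prop := out = apply_operator_alt type_id values
instance (type_id : Int) (values : List Int) (out : Int) : Decidable (Spec_apply_operator type_id values out) := by unfold Spec_apply_operator; infer_instance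

-- ===== CLAIM =====
def Claim_equal_apply_operator : Prop := ∀ (type_id : Int) (values : List Int), Dom_apply_operator type_id values → Pre_apply_operator type_id values → Spec_apply_operator type_id values (apply_operator type_id values)

-- ===== LEMMAS AND PROOFS =====
-- the combined fold is the four separate folds
theorem pvStep_spec (vs : List Int) (s p : Int) (mn mx : Option Int) :
    vs.foldl pvStep (s, p, mn, mx) =
      (vs.foldl (· + ·) s, vs.foldl (· * ·) p,
       vs.foldl (fun a v => some (match a with | none => v | some m => if v < m then v else m)) mn,
       vs.foldl (fun a v => some (match a with | none => v | some m => if v > m then v else m)) mx) := by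
  induction vs generalizing s p mn mx with
  | nil => rfl
  | cons h t ih => simp [List.foldl, pvStep, ih]

theorem pvMinFold (t : List Int) (x : Int) :
    t.foldl (fun a v => some (match a with | none => v | some m => if v < m then v else m)) (some x) =
      some (t.foldl min x) := by
  induction t generalizing x with
  | nil => rfl
  | cons h tl ih =>
    simp only [List.foldl]; rw [ih]
    have hx : (if h < x then h else x) = min x h := by
      simp [min_def]; split_ifs <;> omega
    rw [hx]

theorem pvMaxFold (t : List Int) (x : Int) :
    t.foldl (fun a v => some (match a with | none => v | some m => if v > m then v else m)) (some x) =
      some (t.foldl max x) := by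
  induction t generalizing x with
  | nil => rfl
  | cons h tl ih =>
    simp only [List.foldl]; rw [ih]
    have hx : (if h > x then h else x) = max x h := by
      simp [max_def]; split_ifs <;> omega
    rw [hx]

-- ===== VERDICT =====
theorem apply_operator_spec : Claim_equal_apply_operator := by
  intro t vs _ hpre
  unfold Spec_apply_operator apply_operator apply_operator_alt
  rcases hpre with (h | h) | ⟨h | h, hne⟩ | ⟨h, hlen⟩
  · subst h; simp [pvStep_spec]
  · subst h; norm_num [pvStep_spec]
  · subst h
    obtain ⟨x, tl, rfl⟩ := List.exists_cons_of_ne_nil hne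
    norm_num [pvStep, pvStep_spec, pvMinFold, PySem.List.min?_id_cons]
  · subst h
    obtain ⟨x, tl, rfl⟩ := List.exists_cons_of_ne_nil hne
    norm_num [pvStep, pvStep_spec, pvMaxFold, PySem.List.max?_id_cons]
  · match vs, hlen with
    | [a, b], _ =>
      rcases h with h | h | h <;> subst h <;>
        simp [PySem.List.pyGet?, PySem.List.pyIdx?] <;> split_ifs <;> omega
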